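-- pv_equiv track=rewrite | github.com/OrderAndCh4oS/python-script-benchmark-tools | examples/filter_out_lowest_duplicates.py | sarcoma
-- ===== SOURCE A (Python) =====
-- def sarcoma(arr):
--     lookup = {}
--     result = []
--     for row in arr:
--         row_key, row_value = row['T'], row['V']
--         if not lookup.get(row_key):
--             lookup[row_key] = (row_value, len(result))
--             result.append(row)
--             continue
--
--         lookup_value, result_index = lookup[row_key][0], lookup[row_key][1]
--         if row_value > lookup_value:
--             lookup[row_key] = (row_value, result_index)
--             result[result_index] = row
--
--     return result
-- ===== SOURCE B (Python) =====
-- def sarcoma(arr):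
--     # Phase 1: max value seen for each key, and first-appearance order of keys.
--     maxv = {}
--     order = []
--     for row in arr:
--         k, v = row['T'], row['V']
--         if k not in maxv:
--             order.append(k)
--             maxv[k] = v
--         elif v > maxv[k]:
--             maxv[k] = v
--     # Phase 2: for each key, pick the first row that attains its maximum value.
--     chosen = {}
--     for row in arr:
--         k = row['T']
--         if k not in chosen and row['V'] == maxv[k]:
--             chosen[k] = row
--     return [chosen[k] for k in order]
-- ===== Notes on version B (the rewrite author's own statement) =====
-- stated objective: alternative
-- what changed: B is a staged two-pass algorithm: pass 1 computes only the maximum value per key (plus first-appearance key order), pass 2 selects the first row attaining that maximum by value equality, so no best-row dict is maintained and no row is ever replaced; A does everything in a single pass with a (value,index) dict and in-place result mutation.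
import Mathlib
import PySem

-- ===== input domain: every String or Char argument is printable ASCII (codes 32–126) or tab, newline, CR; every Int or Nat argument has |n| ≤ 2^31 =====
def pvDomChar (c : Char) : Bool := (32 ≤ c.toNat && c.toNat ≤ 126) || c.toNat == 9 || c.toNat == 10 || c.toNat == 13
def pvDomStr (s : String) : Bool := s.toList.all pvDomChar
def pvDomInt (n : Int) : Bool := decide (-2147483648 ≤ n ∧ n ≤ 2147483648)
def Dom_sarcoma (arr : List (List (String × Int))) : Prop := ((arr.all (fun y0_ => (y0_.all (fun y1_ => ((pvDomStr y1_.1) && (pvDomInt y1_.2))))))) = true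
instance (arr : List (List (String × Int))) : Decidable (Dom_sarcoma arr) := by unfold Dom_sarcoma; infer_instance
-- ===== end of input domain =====

-- B replaces A's single pass (a key → (value,index) dict with in-place result mutation) by a staged
-- two-pass algorithm: pass 1 records only the max value per key and first-appearance key order,
-- pass 2 selects the first row attaining that max; no best row is kept or replaced.

-- ===== PORT A =====
-- row['T'] / row['V']: a row is a Python dict; a missing key raises KeyError (excluded by Pre_),
-- the getD default only stands in outside Pre_.
def pvRowGet (row : List (String × Int)) (k : String) : Int :=
  ((PySem.Dict.mk row).get? k).getD 0

def sarcomaStepA (st : PySem.Dict Int (Int × Int) × List (List (String × Int)))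
    (row : List (String × Int)) : PySem.Dict Int (Int × Int) × List (List (String × Int)) :=
  let row_key := pvRowGet row "T"
  let row_value := pvRowGet row "V"
  match st.1.get? row_key with
  | none =>
      -- 'not lookup.get(row_key)': the stored value is a non-empty tuple, hence truthy iff present
      (st.1.insert row_key (row_value, (st.2.length : Int)), st.2 ++ [row])
  | some pr =>
      if pr.1 < row_value then
        -- result[result_index] = row; the stored index is always 0 ≤ i < len(result), so .toNat is exact here
        (st.1.insert row_key (row_value, pr.2), st.2.set pr.2.toNat row)
      else st

def sarcoma (arr : List (List (String × Int))) : List (List (String × Int)) :=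
  (arr.foldl sarcomaStepA (PySem.Dict.empty, [])).2

-- ===== PORT B =====
-- pass 1: (maxv, order)
def sarcomaStepMax (st : PySem.Dict Int Int × List Int)
    (row : List (String × Int)) : PySem.Dict Int Int × List Int :=
  let k := pvRowGet row "T"
  let v := pvRowGet row "V"
  match st.1.get? k with
  | none => (st.1.insert k v, st.2 ++ [k])
  | some m => if m < v then (st.1.insert k v, st.2) else st

-- pass 2: 'if k not in chosen and row['V'] == maxv[k]'; maxv[k] is always present after pass 1,
-- so the getD default is unreachable.
def sarcomaStepChoose (maxv : PySem.Dict Int Int)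
    (chosen : PySem.Dict Int (List (String × Int))) (row : List (String × Int)) :
    PySem.Dict Int (List (String × Int)) :=
  let k := pvRowGet row "T"
  if (chosen.get? k).isNone && (pvRowGet row "V" == (maxv.get? k).getD 0) then
    chosen.insert k row
  else chosen

def sarcoma_alt (arr : List (List (String × Int))) : List (List (String × Int)) :=
  let st := arr.foldl sarcomaStepMax (PySem.Dict.empty, [])
  let chosen := arr.foldl (sarcomaStepChoose st.1) PySem.Dict.empty
  st.2.map (fun k => (chosen.get? k).getD [])

-- ===== PRECONDITION & SPEC =====
-- Pre_ excludes exactly the rows on which row['T'] or row['V'] raises KeyError in A (and in B).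
def Pre_sarcoma (arr : List (List (String × Int))) : Prop :=
  ∀ row ∈ arr, ((PySem.Dict.mk row).get? "T").isSome ∧ ((PySem.Dict.mk row).get? "V").isSome
instance (arr : List (List (String × Int))) : Decidable (Pre_sarcoma arr) := by unfold Pre_sarcoma; infer_instance

def pvWitness_sarcoma : (List (List (String × Int))) :=
  [[("T", 1), ("V", 10)], [("T", 1), ("V", 30)], [("T", 2), ("V", 5)], [("T", 1), ("V", 20)]]

def Spec_sarcoma (arr : List (List (String × Int))) (out : List (List (String × Int))) : Prop := out = sarcoma_alt arr
instance (arr : List (List (String × Int))) (out : List (List (String × Int))) : Decidable (Spec_sarcoma arr out) := by unfold Spec_sarcoma; infer_instance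

-- ===== CLAIM (what is proved, stated in full; the proofs are below) =====
def Claim_equal_sarcoma : Prop := ∀ (arr : List (List (String × Int))), Dom_sarcoma arr → Pre_sarcoma arr → Spec_sarcoma arr (sarcoma arr)

-- ===== LEMMAS AND PROOFS =====

-- Proof-only intermediate: a single-pass best-row dict + key order, linking A to B.
def pvBestStep (st : PySem.Dict Int (List (String × Int)) × List Int)
    (row : List (String × Int)) : PySem.Dict Int (List (String × Int)) × List Int :=
  let key := pvRowGet row "T"
  match st.1.get? key with
  | none => (st.1.insert key row, st.2 ++ [key])
  | some b => if pvRowGet b "V" < pvRowGet row "V" then (st.1.insert key row, st.2) else st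

-- Invariant tying A's (lookup, result) to (best, order).
def pvInv (a : PySem.Dict Int (Int × Int) × List (List (String × Int)))
    (b : PySem.Dict Int (List (String × Int)) × List Int) : Prop :=
  a.2 = b.2.map (fun k => (b.1.get? k).getD [])
  ∧ b.2.Nodup
  ∧ (∀ k, k ∈ b.2 ↔ (b.1.get? k).isSome)
  ∧ (∀ k r, b.1.get? k = some r → a.1.get? k = some (pvRowGet r "V", (b.2.idxOf k : Int)))
  ∧ (∀ k, b.1.get? k = none → a.1.get? k = none)

theorem pvIdxOf_append_of_not_mem {α : Type} [DecidableEq α] {l : List α} (t : List α) {k : α}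
    (h : k ∉ l) : (l ++ t).idxOf k = l.length + t.idxOf k := by
  induction l with
  | nil => simp
  | cons x xs ih =>
      simp only [List.mem_cons, not_or] at h
      simp [Ne.symm h.1, ih h.2]
      omega

theorem pvIdxOf_append_of_mem {α : Type} [DecidableEq α] {l : List α} (t : List α) {k : α}
    (h : k ∈ l) : (l ++ t).idxOf k = l.idxOf k := by
  induction l with
  | nil => simp at h
  | cons x xs ih =>
      by_cases hx : x = k
      · simp [hx]
      · rcases List.mem_cons.mp h with h | h
        · exact absurd h.symm hx
        · simp [hx, ih h]

theorem pvSet_map_idxOf {α β : Type} [DecidableEq α] (l : List α) (f : α → β) (k : α) (x : β)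
    (hnd : l.Nodup) (hk : k ∈ l) :
    (l.map f).set (l.idxOf k) x = l.map (fun k' => if k' = k then x else f k') := by
  induction l with
  | nil => simp at hk
  | cons a as ih =>
      rcases List.nodup_cons.mp hnd with ⟨hna, hnd'⟩
      by_cases ha : a = k
      · subst ha
        have : ∀ k' ∈ as, (if k' = a then x else f k') = f k' := by
          intro k' hk'; rw [if_neg]; intro h; exact hna (h ▸ hk')
        simp [List.map_congr_left this]
      · rcases List.mem_cons.mp hk with h | h
        · exact absurd h.symm ha
        · simp [ha, ih hnd' h]

theorem pvInv_step (a : PySem.Dict Int (Int × Int) × List (List (String × Int)))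
    (b : PySem.Dict Int (List (String × Int)) × List Int)
    (row : List (String × Int)) (h : pvInv a b) :
    pvInv (sarcomaStepA a row) (pvBestStep b row) := by
  obtain ⟨h1, h2, h3, h4, h5⟩ := h
  set k := pvRowGet row "T" with hk
  set v := pvRowGet row "V" with hv
  cases hb : b.1.get? k with
  | none =>
      have ha : a.1.get? k = none := h5 k hb
      have hkmem : k ∉ b.2 := by
        intro hmem; have := (h3 k).mp hmem; rw [hb] at this; simp at this
      unfold sarcomaStepA pvBestStep
      simp only [← hk, ← hv, hb, ha]
      unfold pvInv
      dsimp only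
      refine ⟨?_, ?_, ?_, ?_, ?_⟩
      · rw [h1, List.map_append]
        congr 1
        · apply List.map_congr_left
          intro k' hk'
          rw [PySem.Dict.get?_insert_of_ne _ _ (show k' ≠ k from fun he => hkmem (he ▸ hk'))]
        · simp [PySem.Dict.get?_insert_self]
      · refine List.Nodup.append h2 (List.nodup_singleton _) ?_
        intro a ha hmem
        rw [List.mem_singleton] at hmem
        exact hkmem (hmem ▸ ha)
      · intro k'
        by_cases he : k' = k
        · subst he; simp [PySem.Dict.get?_insert_self]
        · rw [PySem.Dict.get?_insert_of_ne _ _ he]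
          simp only [List.mem_append, List.mem_singleton, he, or_false]
          exact h3 k'
      · intro k' r hr
        by_cases he : k' = k
        · subst he
          rw [PySem.Dict.get?_insert_self] at hr
          injection hr with hr; subst hr
          rw [PySem.Dict.get?_insert_self]
          have hlen : a.2.length = b.2.length := by rw [h1, List.length_map]
          have hidx : (b.2 ++ [k]).idxOf k = b.2.length := by
            rw [pvIdxOf_append_of_not_mem _ hkmem]; simp
          rw [hidx, hlen]
        · rw [PySem.Dict.get?_insert_of_ne _ _ he] at hr
          rw [PySem.Dict.get?_insert_of_ne _ _ he]
          have hmem : k' ∈ b.2 := (h3 k').mpr (by rw [hr]; rfl)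
          rw [pvIdxOf_append_of_mem _ hmem]
          exact h4 k' r hr
      · intro k' hr
        by_cases he : k' = k
        · subst he; rw [PySem.Dict.get?_insert_self] at hr; exact absurd hr (by simp)
        · rw [PySem.Dict.get?_insert_of_ne _ _ he] at hr
          rw [PySem.Dict.get?_insert_of_ne _ _ he]
          exact h5 k' hr
  | some best =>
      have ha : a.1.get? k = some (pvRowGet best "V", (b.2.idxOf k : Int)) := h4 k best hb
      have hkmem : k ∈ b.2 := (h3 k).mpr (by rw [hb]; rfl)
      unfold sarcomaStepA pvBestStep
      simp only [← hk, ← hv, hb, ha]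
      by_cases hcmp : pvRowGet best "V" < v
      · rw [if_pos hcmp, if_pos hcmp]
        refine ⟨?_, h2, ?_, ?_, ?_⟩
        · simp only [Int.toNat_natCast]
          rw [h1, pvSet_map_idxOf _ _ _ _ h2 hkmem]
          apply List.map_congr_left
          intro k' _
          by_cases he : k' = k
          · subst he; simp [PySem.Dict.get?_insert_self]
          · simp [he, PySem.Dict.get?_insert_of_ne _ _ he]
        · intro k'
          by_cases he : k' = k
          · subst he; simp [PySem.Dict.get?_insert_self, hkmem]
          · rw [PySem.Dict.get?_insert_of_ne _ _ he]; exact h3 k'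
        · intro k' r hr
          by_cases he : k' = k
          · subst he
            rw [PySem.Dict.get?_insert_self] at hr
            injection hr with hr; subst hr
            rw [PySem.Dict.get?_insert_self]
          · rw [PySem.Dict.get?_insert_of_ne _ _ he] at hr
            rw [PySem.Dict.get?_insert_of_ne _ _ he]
            exact h4 k' r hr
        · intro k' hr
          by_cases he : k' = k
          · subst he; rw [PySem.Dict.get?_insert_self] at hr; exact absurd hr (by simp)
          · rw [PySem.Dict.get?_insert_of_ne _ _ he] at hr
            rw [PySem.Dict.get?_insert_of_ne _ _ he]
            exact h5 k' hr
      · rw [if_neg hcmp, if_neg hcmp]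
        exact ⟨h1, h2, h3, h4, h5⟩

theorem pvInv_foldl (arr : List (List (String × Int)))
    (a : PySem.Dict Int (Int × Int) × List (List (String × Int)))
    (b : PySem.Dict Int (List (String × Int)) × List Int) (h : pvInv a b) :
    pvInv (arr.foldl sarcomaStepA a) (arr.foldl pvBestStep b) := by
  induction arr generalizing a b with
  | nil => exact h
  | cons row rest ih => exact ih _ _ (pvInv_step a b row h)

theorem pvInv_init : pvInv (PySem.Dict.empty, ([] : List (List (String × Int))))
    (PySem.Dict.empty, ([] : List Int)) := by
  refine ⟨rfl, List.nodup_nil, ?_, ?_, ?_⟩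
  · intro k; simp [PySem.Dict.get?_empty]
  · intro k r hr; rw [PySem.Dict.get?_empty] at hr; exact absurd hr (by simp)
  · intro k _; exact PySem.Dict.get?_empty k

-- ---- link between pvBestStep and B's two passes ----

def pvV (r : List (String × Int)) : Int := pvRowGet r "V"

-- per-key action of pvBestStep
def pvPick (acc : Option (List (String × Int))) (r : List (String × Int)) :
    Option (List (String × Int)) :=
  match acc with
  | none => some r
  | some b => if pvV b < pvV r then some r else acc

-- totalised per-key best from a seed row
def pvPick1 (b0 : List (String × Int)) (l : List (List (String × Int))) : List (String × Int) :=
  l.foldl (fun b r => if pvV b < pvV r then r else b) b0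

-- per-key action of sarcomaStepChoose at target value t
def pvPickC (t : Int) (acc : Option (List (String × Int))) (r : List (String × Int)) :
    Option (List (String × Int)) :=
  if acc.isNone && (pvV r == t) then some r else acc

theorem pvBestStep_get? (st : PySem.Dict Int (List (String × Int)) × List Int)
    (row : List (String × Int)) (k : Int) :
    (pvBestStep st row).1.get? k
      = if pvRowGet row "T" = k then pvPick (st.1.get? k) row else st.1.get? k := by
  unfold pvBestStep pvPick
  by_cases he : pvRowGet row "T" = k
  · rw [if_pos he]
    cases hb : st.1.get? (pvRowGet row "T") with
    | none => rw [he] at hb; simp [hb, he, PySem.Dict.get?_insert_self]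
    | some b =>
        rw [he] at hb
        simp only [he, hb]
        by_cases hc : pvRowGet b "V" < pvRowGet row "V"
        · rw [if_pos hc, if_pos (show pvV b < pvV row from hc)]
          simp [PySem.Dict.get?_insert_self]
        · rw [if_neg hc, if_neg (show ¬ pvV b < pvV row from hc), hb]
  · rw [if_neg he]
    cases hb : st.1.get? (pvRowGet row "T") with
    | none =>
        simp only [hb]
        exact PySem.Dict.get?_insert_of_ne _ _ (fun h => he h.symm)
    | some b =>
        simp only [hb]
        by_cases hc : pvRowGet b "V" < pvRowGet row "V"
        · rw [if_pos hc]
          exact PySem.Dict.get?_insert_of_ne _ _ (fun h => he h.symm)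
        · rw [if_neg hc]

theorem pvBest_proj (arr : List (List (String × Int)))
    (st : PySem.Dict Int (List (String × Int)) × List Int) (k : Int) :
    ((arr.foldl pvBestStep st).1).get? k
      = (arr.filter (fun r => pvRowGet r "T" == k)).foldl pvPick (st.1.get? k) := by
  induction arr generalizing st with
  | nil => rfl
  | cons row rest ih =>
      rw [List.foldl_cons, ih]
      by_cases hk : pvRowGet row "T" = k
      · rw [List.filter_cons_of_pos (by simpa using hk), List.foldl_cons]
        congr 1
        rw [pvBestStep_get?, if_pos hk]
      · rw [List.filter_cons_of_neg (by simpa using hk)]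
        congr 1
        rw [pvBestStep_get?, if_neg hk]

theorem pvChoose_proj (arr : List (List (String × Int))) (m : PySem.Dict Int Int)
    (c : PySem.Dict Int (List (String × Int))) (k : Int) :
    (arr.foldl (sarcomaStepChoose m) c).get? k
      = (arr.filter (fun r => pvRowGet r "T" == k)).foldl
          (pvPickC ((m.get? k).getD 0)) (c.get? k) := by
  induction arr generalizing c with
  | nil => rfl
  | cons row rest ih =>
      rw [List.foldl_cons, ih]
      by_cases hk : pvRowGet row "T" = k
      · rw [List.filter_cons_of_pos (by simpa using hk), List.foldl_cons]
        congr 1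
        unfold sarcomaStepChoose
        simp only [hk, pvPickC, pvV]
        by_cases hc : (c.get? k).isNone && (pvRowGet row "V" == (m.get? k).getD 0)
        · simp [hc, PySem.Dict.get?_insert_self]
        · simp [hc]
      · rw [List.filter_cons_of_neg (by simpa using hk)]
        congr 1
        unfold sarcomaStepChoose
        by_cases hc : (c.get? (pvRowGet row "T")).isNone
            && (pvRowGet row "V" == (m.get? (pvRowGet row "T")).getD 0)
        · simp [hc, PySem.Dict.get?_insert_of_ne _ _ (fun h => hk h.symm)]
        · simp [hc]

-- parallel correspondence: B's pass 1 vs the best-row fold (same order, maxv = V ∘ best)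
theorem pvMax_corr (arr : List (List (String × Int)))
    (bs : PySem.Dict Int (List (String × Int)) × List Int)
    (ms : PySem.Dict Int Int × List Int)
    (ho : ms.2 = bs.2) (hm : ∀ k, ms.1.get? k = (bs.1.get? k).map pvV) :
    (arr.foldl sarcomaStepMax ms).2 = (arr.foldl pvBestStep bs).2
    ∧ ∀ k, (arr.foldl sarcomaStepMax ms).1.get? k
        = ((arr.foldl pvBestStep bs).1.get? k).map pvV := by
  induction arr generalizing bs ms with
  | nil => exact ⟨ho, hm⟩
  | cons row rest ih =>
      rw [List.foldl_cons, List.foldl_cons]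
      have hcur := hm (pvRowGet row "T")
      apply ih
      · unfold sarcomaStepMax pvBestStep
        cases hb : bs.1.get? (pvRowGet row "T") with
        | none =>
            rw [hb] at hcur
            simp only [hb, hcur, Option.map_none]
            rw [ho]
        | some b =>
            rw [hb] at hcur
            simp only [hb, hcur, Option.map_some]
            by_cases hc : pvV b < pvRowGet row "V"
            · rw [if_pos hc, if_pos (show pvRowGet b "V" < pvRowGet row "V" from hc)]
              exact ho
            · rw [if_neg hc, if_neg (show ¬ pvRowGet b "V" < pvRowGet row "V" from hc)]
              exact ho
      · intro k
        unfold sarcomaStepMax pvBestStep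
        cases hb : bs.1.get? (pvRowGet row "T") with
        | none =>
            rw [hb] at hcur
            simp only [hb, hcur, Option.map_none]
            by_cases he : k = pvRowGet row "T"
            · subst he; simp [PySem.Dict.get?_insert_self, pvV]
            · simp [PySem.Dict.get?_insert_of_ne _ _ he, hm k]
        | some b =>
            rw [hb] at hcur
            simp only [hb, hcur, Option.map_some]
            by_cases hc : pvV b < pvRowGet row "V"
            · rw [if_pos hc, if_pos (show pvRowGet b "V" < pvRowGet row "V" from hc)]
              by_cases he : k = pvRowGet row "T"
              · subst he; simp [PySem.Dict.get?_insert_self, pvV]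
              · simp [PySem.Dict.get?_insert_of_ne _ _ he, hm k]
            · rw [if_neg hc, if_neg (show ¬ pvRowGet b "V" < pvRowGet row "V" from hc)]
              exact hm k

-- pvPick from a some-seed is pvPick1
theorem pvPick_some (l : List (List (String × Int))) (b0 : List (String × Int)) :
    l.foldl pvPick (some b0) = some (pvPick1 b0 l) := by
  induction l generalizing b0 with
  | nil => rfl
  | cons r tl ih =>
      rw [List.foldl_cons]
      unfold pvPick1
      rw [List.foldl_cons]
      by_cases hc : pvV b0 < pvV r
      · have h0 : pvPick (some b0) r = some r := by simp [pvPick, hc]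
        rw [h0, if_pos hc]; exact ih r
      · have h0 : pvPick (some b0) r = some b0 := by simp [pvPick, hc]
        rw [h0, if_neg hc]; exact ih b0

theorem pvPick1_le (b0 : List (String × Int)) (l : List (List (String × Int))) :
    pvV b0 ≤ pvV (pvPick1 b0 l) := by
  induction l generalizing b0 with
  | nil => exact le_refl _
  | cons r tl ih =>
      unfold pvPick1
      rw [List.foldl_cons]
      by_cases hc : pvV b0 < pvV r
      · rw [if_pos hc]; exact le_trans (le_of_lt hc) (ih r)
      · rw [if_neg hc]; exact ih b0

theorem pvPick1_eq_of_V_eq (b0 : List (String × Int)) (l : List (List (String × Int)))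
    (h : pvV (pvPick1 b0 l) = pvV b0) : pvPick1 b0 l = b0 := by
  induction l generalizing b0 with
  | nil => rfl
  | cons r tl ih =>
      unfold pvPick1 at h ⊢
      rw [List.foldl_cons] at h ⊢
      by_cases hc : pvV b0 < pvV r
      · rw [if_pos hc] at h
        have := pvPick1_le r tl
        exact absurd h (by unfold pvPick1 at this; omega)
      · rw [if_neg hc] at h ⊢; exact ih b0 h

theorem pvPickC_stay (t : Int) (b : List (String × Int)) (l : List (List (String × Int))) :
    l.foldl (pvPickC t) (some b) = some b := by
  induction l with
  | nil => rfl
  | cons r tl ih => rw [List.foldl_cons]; exact ih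

-- the first row attaining the final max IS the best-fold row
theorem pvFind_pick1 (tl : List (List (String × Int))) (b0 : List (String × Int)) :
    (b0 :: tl).foldl (pvPickC (pvV (pvPick1 b0 tl))) none = some (pvPick1 b0 tl) := by
  induction tl generalizing b0 with
  | nil => simp [pvPickC, pvPick1]
  | cons r tl ih =>
      have hstep : pvPick1 b0 (r :: tl) = pvPick1 (if pvV b0 < pvV r then r else b0) tl := by
        unfold pvPick1; rw [List.foldl_cons]
      by_cases hc : pvV b0 < pvV r
      · rw [hstep, if_pos hc]
        have hne : ¬ pvV b0 = pvV (pvPick1 r tl) := by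
          have := pvPick1_le r tl; omega
        have h0 : pvPickC (pvV (pvPick1 r tl)) none b0 = none := by
          simp [pvPickC, hne]
        rw [List.foldl_cons, h0]
        exact ih r
      · rw [hstep, if_neg hc]
        by_cases hb : pvV b0 = pvV (pvPick1 b0 tl)
        · have h1 : pvPickC (pvV (pvPick1 b0 tl)) none b0 = some b0 := by
            simp [pvPickC, hb]
          rw [List.foldl_cons, h1, pvPickC_stay, pvPick1_eq_of_V_eq b0 tl hb.symm]
        · have h1 : pvPickC (pvV (pvPick1 b0 tl)) none b0 = none := by
            simp [pvPickC, hb]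
          have hrne : ¬ pvV r = pvV (pvPick1 b0 tl) := by
            have := pvPick1_le b0 tl; omega
          have h2 : pvPickC (pvV (pvPick1 b0 tl)) none r = none := by
            simp [pvPickC, hrne]
          have ihb := ih b0
          rw [List.foldl_cons, h1] at ihb
          rw [List.foldl_cons, h1, List.foldl_cons, h2]
          exact ihb

-- chosen agrees with the best-row dict everywhere
theorem pvChosen_eq_best (arr : List (List (String × Int))) (k : Int) :
    (arr.foldl (sarcomaStepChoose (arr.foldl sarcomaStepMax (PySem.Dict.empty, [])).1)
        PySem.Dict.empty).get? k
      = (arr.foldl pvBestStep (PySem.Dict.empty, ([] : List Int))).1.get? k := by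
  have hmax := pvMax_corr arr (PySem.Dict.empty, []) (PySem.Dict.empty, [])
      rfl (by intro k; simp [PySem.Dict.get?_empty])
  rw [pvChoose_proj, pvBest_proj]
  simp only [PySem.Dict.get?_empty]
  cases hf : arr.filter (fun r => pvRowGet r "T" == k) with
  | nil => rfl
  | cons hd tl =>
      have hbest : (hd :: tl).foldl pvPick none = some (pvPick1 hd tl) := by
        rw [List.foldl_cons]
        show tl.foldl pvPick (some hd) = _
        exact pvPick_some tl hd
      have hm : ((arr.foldl sarcomaStepMax (PySem.Dict.empty, [])).1.get? k).getD 0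
          = pvV (pvPick1 hd tl) := by
        rw [hmax.2 k, pvBest_proj]
        simp only [PySem.Dict.get?_empty]
        rw [hf, hbest]
        rfl
      rw [hm, hbest]
      exact pvFind_pick1 tl hd

-- ===== VERDICT (by name: the statement is the Claim_ definition above) =====
theorem sarcoma_spec : Claim_equal_sarcoma := by
  intro arr _ _
  unfold Spec_sarcoma sarcoma
  have hinv := pvInv_foldl arr _ _ pvInv_init
  rw [hinv.1]
  have hmax := pvMax_corr arr (PySem.Dict.empty, []) (PySem.Dict.empty, [])
      rfl (by intro k; simp [PySem.Dict.get?_empty])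
  have halt : sarcoma_alt arr
      = (arr.foldl sarcomaStepMax (PySem.Dict.empty, [])).2.map
          (fun k => ((arr.foldl (sarcomaStepChoose
              (arr.foldl sarcomaStepMax (PySem.Dict.empty, [])).1)
              PySem.Dict.empty).get? k).getD []) := rfl
  rw [halt, hmax.1]
  apply List.map_congr_left
  intro k _
  rw [pvChosen_eq_best]
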